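-- pv_equiv track=rewrite | github.com/prism-engines/prism-engines | engine_core/orchestration/temporal_aggregator.py | get_slowest_frequency
-- ===== SOURCE A (Python) =====
-- from typing import Dict, List, Optional, Tuple, Any
--
-- def get_slowest_frequency(frequencies: Dict[str, str]) -> str:
--     """
--     Get the slowest (lowest) frequency from a set of frequencies.
--
--     Args:
--         frequencies: Dict mapping indicator names to frequency strings
--
--     Returns:
--         The slowest frequency found
--     """
--     freq_order = ['annual', 'quarterly', 'monthly', 'weekly', 'daily', 'unknown']
--
--     slowest_idx = len(freq_order) - 1
--     for freq in frequencies.values():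
--         if freq in freq_order:
--             idx = freq_order.index(freq)
--             if idx < slowest_idx:
--                 slowest_idx = idx
--
--     return freq_order[slowest_idx]
-- ===== SOURCE B (Python) =====
-- def get_slowest_frequency(frequencies):
--     """Idiomatic rewrite: scan the fixed category order slowest-to-fastest and
--     return the first category present among the values; 'unknown' otherwise."""
--     freq_order = ['annual', 'quarterly', 'monthly', 'weekly', 'daily', 'unknown']
--     present = set(frequencies.values())
--     for cat in freq_order:
--         if cat in present:
--             return cat
--     return 'unknown'
-- ===== Notes on version B (the rewrite author's own statement) =====
-- stated objective: idiomatic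
-- what changed: Instead of scanning the values while tracking a running minimum priority index (with a list membership test and list.index per value), B builds a set of the values once and walks the fixed priority order slowest-to-fastest, returning the first category present (default 'unknown').
import Mathlib
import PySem

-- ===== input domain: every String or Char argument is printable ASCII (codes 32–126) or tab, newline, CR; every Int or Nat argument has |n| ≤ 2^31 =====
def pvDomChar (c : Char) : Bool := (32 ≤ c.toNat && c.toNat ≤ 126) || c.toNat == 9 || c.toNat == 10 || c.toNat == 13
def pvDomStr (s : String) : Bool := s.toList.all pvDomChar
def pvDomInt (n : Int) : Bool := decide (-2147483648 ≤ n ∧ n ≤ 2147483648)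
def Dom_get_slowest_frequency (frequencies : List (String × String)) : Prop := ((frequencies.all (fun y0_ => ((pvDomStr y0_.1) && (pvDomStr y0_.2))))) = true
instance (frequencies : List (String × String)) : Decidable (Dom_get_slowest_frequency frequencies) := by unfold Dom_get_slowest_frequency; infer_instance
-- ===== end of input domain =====

-- B walks the fixed priority order and returns the first category present in the value set,
-- instead of A's running-minimum index over the values; same result, more idiomatic.

-- ===== PORT A =====
-- the constant list freq_order of A (and B)
def pvFreqOrder : List String := ["annual", "quarterly", "monthly", "weekly", "daily", "unknown"]

def get_slowest_frequency (frequencies : List (String × String)) : String :=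
  let freq_order := pvFreqOrder
  let slowest_idx : Nat := freq_order.length - 1
  let slowest_idx := ((PySem.Dict.ofList frequencies).values).foldl
    (fun slowest_idx freq =>
      if freq ∈ freq_order then
        match PySem.List.index? freq_order freq with
        | some idx => if idx < slowest_idx then idx else slowest_idx
        | none => slowest_idx   -- unreachable: guarded by the membership test
      else slowest_idx) slowest_idx
  PySem.List.pyGetD freq_order ((slowest_idx : Nat) : Int) ""  -- index is always in range; default never used

-- ===== PORT B =====
def get_slowest_frequency_alt (frequencies : List (String × String)) : String :=
  let freq_order := pvFreqOrder
  let present : PySem.Set String := PySem.Set.ofList ((PySem.Dict.ofList frequencies).values)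
  match freq_order.find? (fun cat => PySem.Set.contains present cat) with
  | some cat => cat
  | none => "unknown"

-- ===== PRECONDITION & SPEC =====
def Spec_get_slowest_frequency (frequencies : List (String × String)) (out : String) : Prop := out = get_slowest_frequency_alt frequencies
instance (frequencies : List (String × String)) (out : String) : Decidable (Spec_get_slowest_frequency frequencies out) := by unfold Spec_get_slowest_frequency; infer_instance

-- ===== CLAIM (what is proved, stated in full; the proofs are below) =====
def Claim_equal_get_slowest_frequency : Prop := ∀ (frequencies : List (String × String)), Dom_get_slowest_frequency frequencies → Spec_get_slowest_frequency frequencies (get_slowest_frequency frequencies)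

-- ===== LEMMAS AND PROOFS =====

-- A's loop step, abstracted
def pvStep (a : Nat) (v : String) : Nat :=
  if v ∈ pvFreqOrder then
    match PySem.List.index? pvFreqOrder v with
    | some idx => if idx < a then idx else a
    | none => a
  else a

lemma pvStep_le (a : Nat) (v : String) : pvStep a v ≤ a := by
  unfold pvStep
  split
  · cases h : PySem.List.index? pvFreqOrder v <;> simp
    split <;> omega
  · exact le_refl a

lemma pvFold_le (vals : List String) (a : Nat) : vals.foldl pvStep a ≤ a := by
  induction vals generalizing a with
  | nil => exact le_refl a
  | cons v vs ih => exact le_trans (ih (pvStep a v)) (pvStep_le a v)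

lemma pvFold_mem (vals : List String) (a : Nat) :
    vals.foldl pvStep a = a ∨ ∃ v ∈ vals, PySem.List.index? pvFreqOrder v = some (vals.foldl pvStep a) := by
  induction vals generalizing a with
  | nil => exact Or.inl rfl
  | cons v vs ih =>
    simp only [List.foldl_cons]
    rcases ih (pvStep a v) with h | ⟨w, hw, hidx⟩
    · rw [h]
      by_cases hmem : v ∈ pvFreqOrder
      · cases hidx : PySem.List.index? pvFreqOrder v with
        | none =>
          rw [PySem.List.index?_eq_idxOf?] at hidx
          exact Or.inl (by simp [pvStep, hmem, hidx])
        | some i =>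
          have hidx' := hidx
          rw [PySem.List.index?_eq_idxOf?] at hidx'
          by_cases hlt : i < a
          · exact Or.inr ⟨v, by simp, by simp [pvStep, hmem, hidx', hlt]⟩
          · exact Or.inl (by simp [pvStep, hmem, hidx', hlt])
      · exact Or.inl (by simp [pvStep, hmem])
    · exact Or.inr ⟨w, by simp [hw], hidx⟩

lemma pvFold_min (vals : List String) (a : Nat) :
    ∀ v ∈ vals, ∀ i, PySem.List.index? pvFreqOrder v = some i → vals.foldl pvStep a ≤ i := by
  induction vals generalizing a with
  | nil => intro v hv; simp at hv
  | cons w ws ih =>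
    intro v hv i hi
    simp only [List.mem_cons] at hv
    simp only [List.foldl_cons]
    rcases hv with rfl | hv
    · have hmem : v ∈ pvFreqOrder :=
        (PySem.List.index?_isSome_iff (xs := pvFreqOrder) (v := v)).mp (by rw [hi]; rfl)
      have h1 : pvStep a v ≤ i := by
        have hi' := hi
        rw [PySem.List.index?_eq_idxOf?] at hi'
        by_cases hlt : i < a
        · simp [pvStep, hmem, hi', hlt]
        · simp [pvStep, hmem, hi', hlt]; omega
      exact le_trans (pvFold_le ws _) h1
    · exact ih (pvStep a w) v hv i hi

-- both programs only depend on the values list; this is the common core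
lemma pv_core (vals : List String) :
    PySem.List.pyGetD pvFreqOrder ((vals.foldl pvStep (pvFreqOrder.length - 1) : Nat) : Int) "" =
    (match pvFreqOrder.find? (fun cat => PySem.Set.contains (PySem.Set.ofList vals) cat) with
     | some cat => cat
     | none => "unknown") := by
  have hlen : pvFreqOrder.length - 1 = 5 := by decide
  set r := vals.foldl pvStep (pvFreqOrder.length - 1) with hrdef
  have hrle : r ≤ 5 := hlen ▸ pvFold_le vals (pvFreqOrder.length - 1)
  rw [PySem.List.pyGetD_natCast]
  by_cases hex' : ∃ v ∈ vals, v ∈ pvFreqOrder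
  · -- some value hits the order list; then ord[r] ∈ vals and nothing earlier is
    obtain ⟨v, hv, hvord⟩ := hex'
    obtain ⟨i, hi⟩ : ∃ i, PySem.List.index? pvFreqOrder v = some i :=
      Option.isSome_iff_exists.mp
        ((PySem.List.index?_isSome_iff (xs := pvFreqOrder) (v := v)).mpr hvord)
    have hAchieved : ∃ w ∈ vals, PySem.List.index? pvFreqOrder w = some r := by
      rcases pvFold_mem vals (pvFreqOrder.length - 1) with h | h
      · have hr5 : r = 5 := h.trans hlen
        have hile : r ≤ i := pvFold_min vals _ v hv i hi
        have hilt : i < 6 := by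
          obtain ⟨hk, -, -⟩ := PySem.List.getElem_of_index?_eq_some hi
          simpa [pvFreqOrder] using hk
        have : i = r := by omega
        exact ⟨v, hv, this ▸ hi⟩
      · exact h
    obtain ⟨w, hw, hwr⟩ := hAchieved
    obtain ⟨hrlt, hgetw, -⟩ := PySem.List.getElem_of_index?_eq_some hwr
    have hordr : pvFreqOrder[r] ∈ vals := hgetw ▸ hw
    have hearlier : ∀ j (hj : j < r), pvFreqOrder[j]'(by omega) ∉ vals := by
      intro j hj hmem
      have hjlt : j < pvFreqOrder.length := by omega
      have hj6 : j < 6 := by simpa [pvFreqOrder] using hjlt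
      have hidxj : PySem.List.index? pvFreqOrder (pvFreqOrder[j]'hjlt) = some j := by
        interval_cases j <;> rfl
      have := pvFold_min vals (pvFreqOrder.length - 1) _ hmem j hidxj
      omega
    have h0 : 0 < r → ("annual" : String) ∉ vals := fun h => by simpa [pvFreqOrder] using hearlier 0 h
    have h1 : 1 < r → ("quarterly" : String) ∉ vals := fun h => by simpa [pvFreqOrder] using hearlier 1 h
    have h2 : 2 < r → ("monthly" : String) ∉ vals := fun h => by simpa [pvFreqOrder] using hearlier 2 h
    have h3 : 3 < r → ("weekly" : String) ∉ vals := fun h => by simpa [pvFreqOrder] using hearlier 3 h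
    have h4 : 4 < r → ("daily" : String) ∉ vals := fun h => by simpa [pvFreqOrder] using hearlier 4 h
    clear hearlier hgetw hwr hrdef
    interval_cases r <;>
      simp_all [pvFreqOrder, List.find?]
  · -- no value is in the order list: the fold stays at 5 and find? finds nothing
    have hex : ∀ v ∈ vals, v ∉ pvFreqOrder := fun v hv hm => hex' ⟨v, hv, hm⟩
    have hr5 : r = 5 := by
      rcases pvFold_mem vals (pvFreqOrder.length - 1) with h | ⟨v, hv, hidx⟩
      · exact h.trans hlen
      · exact absurd ((PySem.List.index?_isSome_iff (xs := pvFreqOrder) (v := v)).mp (by rw [hidx]; rfl))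
          (fun hm => hex v hv hm)
    rw [hr5]
    have g0 : ("annual" : String) ∉ vals := fun h => hex _ h (by decide)
    have g1 : ("quarterly" : String) ∉ vals := fun h => hex _ h (by decide)
    have g2 : ("monthly" : String) ∉ vals := fun h => hex _ h (by decide)
    have g3 : ("weekly" : String) ∉ vals := fun h => hex _ h (by decide)
    have g4 : ("daily" : String) ∉ vals := fun h => hex _ h (by decide)
    have g5 : ("unknown" : String) ∉ vals := fun h => hex _ h (by decide)
    simp [pvFreqOrder, List.find?, g0, g1, g2, g3, g4, g5]

-- ===== VERDICT (by name: the statement is the Claim_ definition above) =====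
theorem get_slowest_frequency_spec : Claim_equal_get_slowest_frequency := by
  intro frequencies _
  unfold Spec_get_slowest_frequency
  exact pv_core ((PySem.Dict.ofList frequencies).values)
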